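-- pv_equiv track=rewrite | github.com/pypi-data/pypi-mirror-385 | packages/param-lsp/param_lsp-0.0.1b20.tar.gz/param_lsp-0.0.1b20/src/param_lsp/_analyzer/static_external_analyzer.py | _base_matches_parameterized_class
-- ===== SOURCE A (Python) =====
-- def _base_matches_parameterized_class(
--     base_name: str, parameterized_classes: set[str]
-- ) -> bool:
--     """Check if a base class name matches any known Parameterized class.
--
--     Handles matching both simple names (e.g., 'ListPanel') and full paths
--     (e.g., 'panel.layout.base.ListPanel'), as well as relative imports and
--     partial qualified paths.
--
--     Args:
--         base_name: Base class name to check (may be simple or fully qualified)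
--         parameterized_classes: Set of full paths to known Parameterized classes
--
--     Returns:
--         True if base_name matches a known Parameterized class
--     """
--     # Direct/exact match: base_name is a full path
--     if base_name in parameterized_classes:
--         return True
--
--     # Simple name match: base_name has no dots (e.g., 'ListPanel')
--     # This handles cases where a class is defined in the same file or imported without qualification
--     # Match: 'ListPanel' matches 'panel.layout.base.ListPanel'
--     if "." not in base_name:
--         return any(full_path.endswith(f".{base_name}") for full_path in parameterized_classes)
--
--     # Handle relative imports (starting with dots)
--     if base_name.startswith("."):
--         # Extract the class name from the relative import
--         # e.g., '..layout.Feed' -> 'Feed'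
--         # e.g., '.parameterized.Parameterized' -> 'Parameterized'
--         parts = base_name.lstrip(".").split(".")
--         if parts:
--             class_name = parts[-1]
--             # Try to match by class name and partial path
--             for full_path in parameterized_classes:
--                 if full_path.endswith(f".{class_name}"):
--                     # Also check if the relative path components match
--                     # e.g., '..layout.Feed' should match paths ending with 'layout.feed.Feed'
--                     if len(parts) > 1:
--                         # Check if the module path components match
--                         rel_module_parts = parts[:-1]  # Exclude class name
--                         full_parts = full_path.split(".")
--                         # Try to find matching suffix
--                         for i in range(len(full_parts) - len(parts) + 1):
--                             if full_parts[i : i + len(rel_module_parts)] == rel_module_parts: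
--                                 return True
--                     else:
--                         # Just class name, already matched
--                         return True
--         return False
--
--     # Partial qualified path match (e.g., 'layout.Feed' or 'panel.layout.Feed')
--     # This handles cases where imports create partial paths like "from panel import layout; layout.Feed"
--     base_parts = base_name.split(".")
--     base_class = base_parts[-1]
--
--     for full_path in parameterized_classes:
--         full_parts = full_path.split(".")
--
--         # Check if the class names match
--         if full_parts[-1] != base_class:
--             continue
--
--         # Check if base_name components are a suffix of full_path
--         # e.g., 'panel.layout.Feed' matches 'panel.layout.feed.Feed'
--         if len(base_parts) <= len(full_parts):
--             # Try matching from the end (suffix match)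
--             matches = True
--             j = len(full_parts) - 1
--             for i in range(len(base_parts) - 1, -1, -1):
--                 if base_parts[i] != full_parts[j]:
--                     matches = False
--                     break
--                 j -= 1
--             if matches:
--                 return True
--
--             # Also try matching as a contiguous substring (for complex import patterns)
--             for offset in range(len(full_parts) - len(base_parts) + 1):
--                 if full_parts[offset : offset + len(base_parts)] == base_parts:
--                     return True
--
--     return False
-- ===== SOURCE B (Python) =====
-- def _base_matches_parameterized_class(base_name, parameterized_classes):
--     if base_name in parameterized_classes:
--         return True
--     if "." not in base_name:
--         suffix = "." + base_name
--         return any(p.endswith(suffix) for p in parameterized_classes)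
--     if base_name.startswith("."):
--         # relative import: work purely on strings, no splitting of the known
--         # paths — component-slice matching becomes dot-delimited substring search
--         parts = base_name.lstrip(".").split(".")
--         suffix = "." + parts[-1]
--         mods = parts[:-1]
--         if not mods:
--             return any(p.endswith(suffix) for p in parameterized_classes)
--         pat = "." + ".".join(mods) + "."
--         # pat must occur before the final component, hence no trailing dot added
--         return any(p.endswith(suffix) and pat in "." + p for p in parameterized_classes)
--     # partial qualified path: base_name's components form a contiguous run of the
--     # path's components iff ".base_name." is a substring of the dot-wrapped path
--     # (a suffix match is the run at the last offset, so one test covers both)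
--     suffix = "." + base_name.split(".")[-1]
--     pat = "." + base_name + "."
--     return any(p.endswith(suffix) and pat in "." + p + "." for p in parameterized_classes)
-- ===== Notes on version B (the rewrite author's own statement) =====
-- stated objective: faster
-- what changed: B never splits the known paths and has no offset/suffix scanning loops: it reduces every component-level match to plain string tests, using that a contiguous run of dot-joined components is exactly a dot-delimited substring ('.base.' in '.path.'), with the relative-import case matching against '.'+path (no trailing dot) to force a component after the match; this folds A's manual suffix loop and slice scan into one endswith plus one substring search per path.
import Mathlib
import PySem

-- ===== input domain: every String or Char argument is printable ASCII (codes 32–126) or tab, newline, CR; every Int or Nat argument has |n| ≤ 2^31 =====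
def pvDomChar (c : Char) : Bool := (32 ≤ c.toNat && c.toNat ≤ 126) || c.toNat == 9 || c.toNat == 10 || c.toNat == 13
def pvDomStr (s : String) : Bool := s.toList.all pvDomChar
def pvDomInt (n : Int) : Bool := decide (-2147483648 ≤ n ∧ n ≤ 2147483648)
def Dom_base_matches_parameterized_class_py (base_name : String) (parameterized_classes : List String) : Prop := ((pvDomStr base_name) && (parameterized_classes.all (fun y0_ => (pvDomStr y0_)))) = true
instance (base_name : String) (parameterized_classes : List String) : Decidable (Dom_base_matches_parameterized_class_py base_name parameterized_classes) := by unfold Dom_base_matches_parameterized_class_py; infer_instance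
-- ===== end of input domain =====

-- B replaces A's per-path splitting and nested component-slice loops by pure string tests:
-- a component run of the dot-joined name is a dot-delimited substring of the dot-wrapped path.


-- shared primitive ports (both Pythons call s.lstrip(".") and s.split("."))
-- s.lstrip("."): exact — lstrip with a char set drops leading chars from that set
def pvLstripDot (s : String) : String := String.ofList (s.toList.dropWhile (fun c => c == '.'))

-- s.split("."): the separator is nonempty, so split? is always `some`
def pvSplitDot (s : String) : List String := (PySem.Str.split? s ".").getD []

-- ===== PORT A =====
-- the manual reversed-index suffix loop of A ('matches'/'j' with break);
-- pyGetD with default "" is exact here: every index the loop reads is in range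
def pvSuffixGo (base_parts full_parts : List String) : List Int → Int → Bool
  | [], _ => true
  | i :: rest, j =>
    if (PySem.List.pyGetD base_parts i "" == PySem.List.pyGetD full_parts j "") = false then false
    else pvSuffixGo base_parts full_parts rest (j - 1)

def pvSuffixLoop (base_parts full_parts : List String) : Bool :=
  pvSuffixGo base_parts full_parts
    (PySem.List.pyRange ((base_parts.length : Int) - 1) (-1) (-1))
    ((full_parts.length : Int) - 1)

def base_matches_parameterized_class_py (base_name : String) (parameterized_classes : List String) : Bool :=
  if parameterized_classes.contains base_name then true
  else if PySem.Str.isIn "." base_name = false then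
    parameterized_classes.any (fun full_path => PySem.Str.endswith full_path ("." ++ base_name))
  else if PySem.Str.startswith base_name "." then
    let parts := pvSplitDot (pvLstripDot base_name)
    if parts.isEmpty then false   -- `if parts:` (split never returns [], so the else arm is dead)
    else
      let class_name := parts.getLastD ""   -- parts[-1]; parts ≠ [] here
      parameterized_classes.any (fun full_path =>
        PySem.Str.endswith full_path ("." ++ class_name) &&
          (if 1 < parts.length then
            let rel_module_parts := parts.dropLast
            let full_parts := pvSplitDot full_path
            (PySem.List.pyRange 0 ((full_parts.length : Int) - (parts.length : Int) + 1) 1).any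
              (fun i => PySem.List.slice full_parts (some i) (some (i + (rel_module_parts.length : Int))) == rel_module_parts)
          else true))
  else
    let base_parts := pvSplitDot base_name
    let base_class := base_parts.getLastD ""   -- base_parts[-1]; split never returns []
    parameterized_classes.any (fun full_path =>
      let full_parts := pvSplitDot full_path
      if (full_parts.getLastD "" == base_class) = false then false
      else if base_parts.length ≤ full_parts.length then
        pvSuffixLoop base_parts full_parts ||
          (PySem.List.pyRange 0 ((full_parts.length : Int) - (base_parts.length : Int) + 1) 1).any
            (fun off => PySem.List.slice full_parts (some off) (some (off + (base_parts.length : Int))) == base_parts)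
      else false)

-- ===== PORT B =====
def base_matches_parameterized_class_py_alt (base_name : String) (parameterized_classes : List String) : Bool :=
  if parameterized_classes.contains base_name then true
  else if PySem.Str.isIn "." base_name = false then
    parameterized_classes.any (fun p => PySem.Str.endswith p ("." ++ base_name))
  else if PySem.Str.startswith base_name "." then
    let parts := pvSplitDot (pvLstripDot base_name)
    let suffix := "." ++ parts.getLastD ""
    let mods := parts.dropLast
    if mods.isEmpty then
      parameterized_classes.any (fun p => PySem.Str.endswith p suffix)
    else
      let pat := "." ++ PySem.Str.join "." mods ++ "."
      -- pat must occur before the final component, hence no trailing dot added to the path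
      parameterized_classes.any (fun p =>
        PySem.Str.endswith p suffix && PySem.Str.isIn pat ("." ++ p))
  else
    let suffix := "." ++ (pvSplitDot base_name).getLastD ""
    let pat := "." ++ base_name ++ "."
    parameterized_classes.any (fun p =>
      PySem.Str.endswith p suffix && PySem.Str.isIn pat ("." ++ p ++ "."))

-- ===== PRECONDITION & SPEC =====
def Spec_base_matches_parameterized_class_py (base_name : String) (parameterized_classes : List String) (out : Bool) : Prop := out = base_matches_parameterized_class_py_alt base_name parameterized_classes
instance (base_name : String) (parameterized_classes : List String) (out : Bool) : Decidable (Spec_base_matches_parameterized_class_py base_name parameterized_classes out) := by unfold Spec_base_matches_parameterized_class_py; infer_instance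

-- ===== CLAIM (what is proved, stated in full; the proofs are below) =====
def Claim_equal_base_matches_parameterized_class_py : Prop := ∀ (base_name : String) (parameterized_classes : List String), Dom_base_matches_parameterized_class_py base_name parameterized_classes → Spec_base_matches_parameterized_class_py base_name parameterized_classes (base_matches_parameterized_class_py base_name parameterized_classes)

-- ===== LEMMAS AND PROOFS =====

-- a model of str.split(".") on char lists
def pvConsHead (x : List Char) : List (List Char) → List (List Char)
  | [] => [x]
  | h :: t => (x ++ h) :: t

def pvSplitC : List Char → List (List Char)
  | [] => [[]]
  | c :: r => if c = '.' then [] :: pvSplitC r else pvConsHead [c] (pvSplitC r)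

lemma pvConsHead_ne_nil (x : List Char) (l : List (List Char)) : pvConsHead x l ≠ [] := by
  cases l <;> simp [pvConsHead]

lemma pvSplitC_ne_nil (s : List Char) : pvSplitC s ≠ [] := by
  cases s with
  | nil => simp [pvSplitC]
  | cons c r =>
    simp only [pvSplitC]
    split
    · simp
    · exact pvConsHead_ne_nil _ _

lemma pvGo (fuel : Nat) (l cur : List Char) (acc : List (List Char)) (h : l.length < fuel) :
    PySem.Chars.splitOn.go ['.'] fuel l cur acc = acc.reverse ++ pvConsHead cur.reverse (pvSplitC l) := by
  induction fuel generalizing l cur acc with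
  | zero => omega
  | succ fuel ih =>
    cases l with
    | nil =>
      rw [PySem.Chars.splitOn.go]
      · simp [pvSplitC, pvConsHead]
      · omega
    | cons c rest =>
      rw [PySem.Chars.splitOn.go]
      by_cases hc : c = '.'
      · subst hc
        have hpre : List.isPrefixOf ['.'] ('.' :: rest) = true := by simp [List.isPrefixOf]
        simp only [hpre, if_true, List.length_cons, List.length_nil, List.drop_succ_cons, List.drop_zero]
        rw [ih rest [] (cur.reverse :: acc) (by simp at h; omega)]
        simp only [pvSplitC, List.reverse_cons, List.append_assoc]
        cases h2 : pvSplitC rest with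
        | nil => exact absurd h2 (pvSplitC_ne_nil _)
        | cons a t => simp [pvConsHead]
      · have hpre : List.isPrefixOf ['.'] (c :: rest) = false := by
          simp [List.isPrefixOf]; exact fun hh => absurd hh.symm (by simpa using hc)
        simp only [hpre, Bool.false_eq_true, if_false]
        rw [ih rest (c :: cur) acc (by simp at h; omega)]
        simp only [pvSplitC, if_neg hc, List.reverse_cons]
        cases h2 : pvSplitC rest with
        | nil => exact absurd h2 (pvSplitC_ne_nil _)
        | cons a t => simp [pvConsHead, List.append_assoc]

lemma pvSplitOn_dot (s : List Char) : PySem.Chars.splitOn s ['.'] = pvSplitC s := by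
  unfold PySem.Chars.splitOn
  rw [pvGo _ _ _ _ (by omega)]
  cases h2 : pvSplitC s with
  | nil => exact absurd h2 (pvSplitC_ne_nil _)
  | cons a t => simp [pvConsHead]

lemma pvSplitDot_eq (s : String) : pvSplitDot s = (pvSplitC s.toList).map String.ofList := by
  rw [pvSplitDot, PySem.Str.split?]
  have : ("." : String).toList = ['.'] := rfl
  rw [this]
  simp [PySem.Chars.split?, pvSplitOn_dot]

lemma pvSplitDot_ne_nil (s : String) : pvSplitDot s ≠ [] := by
  rw [pvSplitDot_eq]
  simp [pvSplitC_ne_nil]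

lemma pvConsHead_append (x : List Char) (l m : List (List Char)) (hl : l ≠ []) :
    pvConsHead x (l ++ m) = pvConsHead x l ++ m := by
  cases l with
  | nil => exact absurd rfl hl
  | cons h t => simp [pvConsHead]

lemma pvSplitC_append (t c : List Char) : pvSplitC (t ++ '.' :: c) = pvSplitC t ++ pvSplitC c := by
  induction t with
  | nil => simp [pvSplitC]
  | cons a t ih =>
    by_cases ha : a = '.'
    · simp [pvSplitC, ha, ih]
    · simp only [List.cons_append, pvSplitC, if_neg ha, ih]
      exact pvConsHead_append _ _ _ (pvSplitC_ne_nil t)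

lemma pvSplitC_no_dot (s : List Char) : ∀ p ∈ pvSplitC s, '.' ∉ p := by
  induction s with
  | nil => simp [pvSplitC]
  | cons c r ih =>
    by_cases hc : c = '.'
    · simp only [pvSplitC, if_pos hc, List.mem_cons]
      rintro p (rfl | hp)
      · simp
      · exact ih p hp
    · simp only [pvSplitC, if_neg hc]
      cases hr : pvSplitC r with
      | nil => exact absurd hr (pvSplitC_ne_nil r)
      | cons h t =>
        simp only [pvConsHead, List.mem_cons]
        rintro p (rfl | hp)
        · intro hmem
          rcases List.mem_cons.mp hmem with h1 | h1
          · exact hc h1.symm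
          · exact ih h (by rw [hr]; exact List.mem_cons_self) h1
        · exact ih p (by rw [hr]; exact List.mem_cons_of_mem _ hp)

lemma pvIcc (a b : List Char) (u : List (List Char)) :
    ['.'].intercalate (a :: b :: u) = a ++ '.' :: ['.'].intercalate (b :: u) := by
  simp [List.intercalate, List.intersperse]

lemma pvJoinSnoc (init : List (List Char)) (c : List Char) (h : init ≠ []) :
    List.intercalate ['.'] (init ++ [c]) = List.intercalate ['.'] init ++ '.' :: c := by
  induction init with
  | nil => exact absurd rfl h
  | cons a t ih =>
    cases t with
    | nil => simp [List.intercalate]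
    | cons b u =>
      have := ih (by simp)
      simp only [List.cons_append, pvIcc] at *
      rw [this]
      simp

lemma pvJoin (s : List Char) : List.intercalate ['.'] (pvSplitC s) = s := by
  induction s with
  | nil => simp [pvSplitC, List.intercalate]
  | cons c r ih =>
    by_cases hc : c = '.'
    · subst hc
      simp only [pvSplitC]
      cases h2 : pvSplitC r with
      | nil => exact absurd h2 (pvSplitC_ne_nil _)
      | cons a t =>
        rw [h2] at ih
        simp only [if_true]
        rw [pvIcc]
        simp [ih]
    · simp only [pvSplitC, if_neg hc]
      cases h2 : pvSplitC r with
      | nil => exact absurd h2 (pvSplitC_ne_nil _)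
      | cons a t =>
        rw [h2] at ih
        cases t with
        | nil => simp [List.intercalate] at ih ⊢; simp [pvConsHead, ih]
        | cons b u =>
          simp only [pvConsHead]
          rw [pvIcc] at ih ⊢
          simp [← ih]

lemma pvSplitC_nodot (c : List Char) (hc : '.' ∉ c) : pvSplitC c = [c] := by
  induction c with
  | nil => simp [pvSplitC]
  | cons a r ih =>
    have ha : a ≠ '.' := fun h => hc (h ▸ List.mem_cons_self)
    have hr : '.' ∉ r := fun h => hc (List.mem_cons_of_mem _ h)
    simp [pvSplitC, ha, ih hr, pvConsHead]

-- endswith("." + c) on a string = (the last split component is c, and there are ≥ 2 components)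
lemma pvEndsKeyC (s c : List Char) (hc : '.' ∉ c) :
    PySem.Chars.endswith s ('.' :: c) = true ↔
      (pvSplitC s).getLast? = some c ∧ 2 ≤ (pvSplitC s).length := by
  rw [PySem.Chars.endswith_iff]
  constructor
  · rintro ⟨t, rfl⟩
    have hlen : pvSplitC t ≠ [] := pvSplitC_ne_nil t
    have : pvSplitC (t ++ '.' :: c) = pvSplitC t ++ [c] := by
      rw [pvSplitC_append, pvSplitC_nodot c hc]
    rw [this]
    refine ⟨List.getLast?_concat, ?_⟩
    have := List.length_pos_iff.mpr hlen
    simp only [List.length_append, List.length_cons, List.length_nil]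
    omega
  · rintro ⟨hlast, hlen⟩
    have hne : pvSplitC s ≠ [] := pvSplitC_ne_nil s
    have hgl : (pvSplitC s).getLast hne = c := by
      have := List.getLast?_eq_some_getLast (l := pvSplitC s) hne
      rw [hlast] at this
      exact (Option.some.injEq _ _ ▸ this.symm : _)
    have hdec : (pvSplitC s).dropLast ++ [c] = pvSplitC s := by
      rw [← hgl]
      exact List.dropLast_concat_getLast hne
    have hdne : (pvSplitC s).dropLast ≠ [] := by
      have : (pvSplitC s).dropLast.length = (pvSplitC s).length - 1 := List.length_dropLast
      intro hx
      rw [hx] at this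
      simp at this
      omega
    have hs : s = List.intercalate ['.'] ((pvSplitC s).dropLast) ++ '.' :: c := by
      conv_lhs => rw [← pvJoin s, ← hdec]
      exact pvJoinSnoc _ _ hdne
    rw [hs]
    exact List.suffix_append _ _

lemma pvEndsKey (p c : String) (hc : '.' ∉ c.toList) :
    PySem.Str.endswith p ("." ++ c) =
      (((pvSplitDot p).getLastD "" == c) && decide (1 < (pvSplitDot p).length)) := by
  rw [Bool.eq_iff_iff, PySem.Str.endswith_eq]
  have htl : ("." ++ c).toList = '.' :: c.toList := by simp
  rw [htl, pvEndsKeyC _ _ hc, pvSplitDot_eq]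
  cases hL : pvSplitC p.toList with
  | nil => exact absurd hL (pvSplitC_ne_nil _)
  | cons a t =>
    simp only [List.getLastD_eq_getLast?, List.getLast?_map, List.length_map,
      Bool.and_eq_true, beq_iff_eq, decide_eq_true_eq]
    constructor
    · rintro ⟨h1, h2⟩
      rw [h1]
      refine ⟨by simp, by omega⟩
    · rintro ⟨h1, h2⟩
      cases hx : (a :: t).getLast? with
      | none => simp at hx
      | some x =>
        rw [hx] at h1
        simp only [Option.map_some, Option.getD_some] at h1
        refine ⟨?_, by omega⟩
        have hxc : x = c.toList := by rw [← h1]; simp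
        rw [hxc]

lemma pvSuffixGo_spec (bp fp : List String) (m n : Nat)
    (hm : m ≤ bp.length) (hn : n ≤ fp.length) (hmn : m ≤ n) :
    pvSuffixGo bp fp (PySem.List.pyRange ((m : Int) - 1) (-1) (-1)) ((n : Int) - 1) =
      decide ((bp.take m).reverse <+: (fp.take n).reverse) := by
  induction m generalizing n with
  | zero =>
    have hr : PySem.List.pyRange ((0 : Nat) - 1 : Int) (-1) (-1) = [] := by
      rw [PySem.List.pyRange_neg_one]
      norm_num
    rw [hr]
    simp [pvSuffixGo, List.nil_prefix]
  | succ m ihm =>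
    cases n with
    | zero => omega
    | succ n' =>
      have hcast1 : ((m + 1 : Nat) : Int) - 1 = (m : Int) := by push_cast; ring
      have hcast2 : ((n' + 1 : Nat) : Int) - 1 = (n' : Int) := by push_cast; ring
      have hcons : PySem.List.pyRange ((m + 1 : Nat) - 1 : Int) (-1) (-1) =
          (m : Int) :: PySem.List.pyRange ((m : Int) - 1) (-1) (-1) := by
        rw [hcast1, PySem.List.pyRange_neg_one_cons (by omega)]
      rw [hcons]
      simp only [pvSuffixGo, hcast2, PySem.List.pyGetD_natCast]
      have hmb : m < bp.length := by omega
      have hnf : n' < fp.length := by omega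
      have hgb : bp.getD m "" = bp[m] := List.getD_eq_getElem bp "" hmb
      have hgf : fp.getD n' "" = fp[n'] := List.getD_eq_getElem fp "" hnf
      have htb : (bp.take (m + 1)).reverse = bp[m] :: (bp.take m).reverse := by
        rw [List.take_add_one]
        simp [List.getElem?_eq_getElem hmb]
      have htf : (fp.take (n' + 1)).reverse = fp[n'] :: (fp.take n').reverse := by
        rw [List.take_add_one]
        simp [List.getElem?_eq_getElem hnf]
      rw [hgb, hgf, htb, htf]
      by_cases heq : bp[m] = fp[n']
      · have : (bp[m] == fp[n']) = true := by simp [heq]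
        simp only [this, Bool.true_eq_false, if_false]
        rw [ihm n' (by omega) (by omega) (by omega)]
        simp [List.cons_prefix_cons, heq]
      · have : (bp[m] == fp[n']) = false := by simp [heq]
        simp only [this]
        simp [List.cons_prefix_cons, heq]

lemma pvSuffixLoop_suffix (bp fp : List String) (hlen : bp.length ≤ fp.length)
    (h : pvSuffixLoop bp fp = true) : bp <:+ fp := by
  unfold pvSuffixLoop at h
  rw [pvSuffixGo_spec bp fp bp.length fp.length le_rfl le_rfl hlen] at h
  rw [List.take_length, List.take_length] at h
  exact List.reverse_prefix.mp (of_decide_eq_true h)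

-- the last component of a split never contains the separator
lemma pvSplitDot_last_nodot (s : String) : '.' ∉ ((pvSplitDot s).getLastD "").toList := by
  rw [pvSplitDot_eq]
  cases hL : pvSplitC s.toList with
  | nil => exact absurd hL (pvSplitC_ne_nil _)
  | cons a t =>
    simp only [List.getLastD_eq_getLast?, List.getLast?_map]
    cases hx : (a :: t).getLast? with
    | none => simp at hx
    | some x =>
      simp only [Option.map_some, Option.getD_some]
      have hmem : x ∈ pvSplitC s.toList := by
        rw [hL]
        exact List.mem_of_getLast? hx
      have := pvSplitC_no_dot s.toList x hmem
      simpa using this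

-- ===== infix-of-intercalate machinery (the heart of the equivalence) =====

lemma pvIcs (a : List Char) : List.intercalate ['.'] [a] = a := by
  simp [List.intercalate]

lemma pvInfixMapToList (X Y : List String) :
    X.map String.toList <:+: Y.map String.toList ↔ X <:+: Y := by
  constructor
  · rintro ⟨u, v, huv⟩
    obtain ⟨l1, l2, rfl, h1, h2⟩ := List.map_eq_append_iff.mp huv.symm
    obtain ⟨l11, l12, rfl, h11, h12⟩ := List.map_eq_append_iff.mp h1
    have hinj : Function.Injective String.toList := fun a b h => String.toList_injective h
    have h12' : l12 = X := List.map_injective_iff.mpr hinj h12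
    subst h12'
    exact ⟨l11, l2, by simp⟩
  · rintro ⟨u, v, rfl⟩
    exact ⟨u.map String.toList, v.map String.toList, by simp⟩

lemma pvH1 (x : List Char) (m : List Char) (a m' : List Char)
    (hx : '.' ∉ x) (ha : '.' ∉ a) :
    (x ++ '.' :: m <+: a ++ '.' :: m') ↔ (x = a ∧ m <+: m') := by
  induction x generalizing a with
  | nil =>
    cases a with
    | nil => simp
    | cons c a' =>
      simp only [List.nil_append, List.cons_append, List.cons_prefix_cons]
      constructor
      · rintro ⟨h1, -⟩
        exact absurd (h1 ▸ List.mem_cons_self) ha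
      · rintro ⟨h1, -⟩
        exact absurd h1 (by simp)
  | cons d x' ih =>
    cases a with
    | nil =>
      simp only [List.cons_append, List.nil_append, List.cons_prefix_cons]
      constructor
      · rintro ⟨h1, -⟩
        exact absurd (h1 ▸ List.mem_cons_self) hx
      · rintro ⟨h1, -⟩
        exact absurd h1 (by simp)
    | cons c a' =>
      have hx' : '.' ∉ x' := fun h => hx (List.mem_cons_of_mem _ h)
      have ha' : '.' ∉ a' := fun h => ha (List.mem_cons_of_mem _ h)
      simp only [List.cons_append, List.cons_prefix_cons, ih a' hx' ha', List.cons.injEq]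
      tauto

lemma pvH2 (q r a : List Char) (ha : '.' ∉ a) (h : '.' :: q <:+: a ++ r) :
    '.' :: q <:+: r := by
  induction a with
  | nil => simpa using h
  | cons c a' ih =>
    rcases List.infix_cons_iff.mp h with hpre | hinf
    · rcases List.cons_prefix_cons.mp hpre with ⟨h1, -⟩
      exact absurd (h1 ▸ List.mem_cons_self) ha
    · exact ih (fun hm => ha (List.mem_cons_of_mem _ hm)) hinf

lemma pvNoDotNotPrefix (u l : List Char) (hu : '.' ∈ u) (hl : '.' ∉ l) : ¬ u <+: l :=
  fun h => hl (h.subset hu)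

lemma pvNoDotNotInfix (u l : List Char) (hu : '.' ∈ u) (hl : '.' ∉ l) : ¬ u <:+: l :=
  fun h => hl (h.subset hu)

lemma pvK1t (X : List (List Char)) : ∀ (L : List (List Char)), X ≠ [] → L ≠ [] →
    (∀ p ∈ X, '.' ∉ p) → (∀ p ∈ L, '.' ∉ p) →
    ((List.intercalate ['.'] X ++ ['.'] <+: List.intercalate ['.'] L ++ ['.']) ↔ X <+: L) := by
  induction X with
  | nil => intro L hX; exact absurd rfl hX
  | cons x X' ih =>
    intro L _ hL hXd hLd
    have hxd : '.' ∉ x := hXd x List.mem_cons_self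
    cases L with
    | nil => exact absurd rfl hL
    | cons l L' =>
      have hld : '.' ∉ l := hLd l List.mem_cons_self
      cases X' with
      | nil =>
        cases L' with
        | nil =>
          rw [pvIcs, pvIcs, pvH1 x [] l [] hxd hld]
          simp [List.cons_prefix_cons]
        | cons l2 L'' =>
          rw [pvIcs, pvIcc]
          simp only [List.cons_append, List.append_assoc]
          rw [pvH1 x [] l _ hxd hld]
          simp [List.cons_prefix_cons]
      | cons x2 X'' =>
        have hX'd : ∀ p ∈ x2 :: X'', '.' ∉ p := fun p hp => hXd p (List.mem_cons_of_mem _ hp)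
        cases L' with
        | nil =>
          rw [pvIcc, pvIcs]
          simp only [List.cons_append, List.append_assoc]
          rw [pvH1 x _ l [] hxd hld]
          simp [List.cons_prefix_cons]
        | cons l2 L'' =>
          have hL'd : ∀ p ∈ l2 :: L'', '.' ∉ p := fun p hp => hLd p (List.mem_cons_of_mem _ hp)
          rw [pvIcc, pvIcc]
          simp only [List.cons_append, List.append_assoc]
          rw [pvH1 x _ l _ hxd hld, ih (l2 :: L'') (by simp) (by simp) hX'd hL'd]
          simp [List.cons_prefix_cons]

lemma pvK1t' (X : List (List Char)) : ∀ (L : List (List Char)), X ≠ [] → L ≠ [] →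
    (∀ p ∈ X, '.' ∉ p) → (∀ p ∈ L, '.' ∉ p) →
    ((List.intercalate ['.'] X ++ ['.'] <+: List.intercalate ['.'] L) ↔ X <+: L.dropLast) := by
  induction X with
  | nil => intro L hX; exact absurd rfl hX
  | cons x X' ih =>
    intro L _ hL hXd hLd
    have hxd : '.' ∉ x := hXd x List.mem_cons_self
    cases L with
    | nil => exact absurd rfl hL
    | cons l L' =>
      have hld : '.' ∉ l := hLd l List.mem_cons_self
      cases X' with
      | nil =>
        cases L' with
        | nil =>
          rw [pvIcs, pvIcs]
          constructor
          · intro h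
            exact absurd h (pvNoDotNotPrefix _ _ (by simp) hld)
          · intro h
            simp at h
        | cons l2 L'' =>
          rw [pvIcs, pvIcc, pvH1 x [] l _ hxd hld, List.dropLast_cons₂]
          simp [List.cons_prefix_cons]
      | cons x2 X'' =>
        have hX'd : ∀ p ∈ x2 :: X'', '.' ∉ p := fun p hp => hXd p (List.mem_cons_of_mem _ hp)
        cases L' with
        | nil =>
          rw [pvIcc, pvIcs]
          simp only [List.cons_append, List.append_assoc]
          constructor
          · intro h
            exact absurd h (pvNoDotNotPrefix _ _ (by simp) hld)
          · intro h
            simp at h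
        | cons l2 L'' =>
          have hL'd : ∀ p ∈ l2 :: L'', '.' ∉ p := fun p hp => hLd p (List.mem_cons_of_mem _ hp)
          rw [pvIcc, pvIcc]
          simp only [List.cons_append, List.append_assoc]
          rw [pvH1 x _ l _ hxd hld, ih (l2 :: L'') (by simp) (by simp) hX'd hL'd,
            List.dropLast_cons₂]
          simp [List.cons_prefix_cons]

lemma pvK2 (X : List (List Char)) (hX : X ≠ []) (hXd : ∀ p ∈ X, '.' ∉ p) :
    ∀ (L : List (List Char)), L ≠ [] → (∀ p ∈ L, '.' ∉ p) →
    (('.' :: (List.intercalate ['.'] X ++ ['.']) <:+: '.' :: (List.intercalate ['.'] L ++ ['.'])) ↔ X <:+: L) := by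
  intro L
  induction L with
  | nil => intro hL; exact absurd rfl hL
  | cons l L' ih =>
    intro _ hLd
    have hld : '.' ∉ l := hLd l List.mem_cons_self
    cases L' with
    | nil =>
      constructor
      · intro h
        rcases List.infix_cons_iff.mp h with hpre | hinf
        · have h2 := (List.cons_prefix_cons.mp hpre).2
          exact ((pvK1t X [l] hX (by simp) hXd hLd).mp h2).isInfix
        · rw [pvIcs] at hinf
          have h2 := pvH2 _ _ l hld hinf
          have h3 := h2.length_le
          simp [List.length_append] at h3
      · intro h
        rcases List.infix_cons_iff.mp h with hpre | hinf
        · exact (List.cons_prefix_cons.mpr ⟨rfl, (pvK1t X [l] hX (by simp) hXd hLd).mpr hpre⟩).isInfix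
        · rw [List.infix_nil] at hinf
          exact absurd hinf hX
    | cons l2 L'' =>
      have hL'd : ∀ p ∈ l2 :: L'', '.' ∉ p := fun p hp => hLd p (List.mem_cons_of_mem _ hp)
      have hshape : ('.' :: (List.intercalate ['.'] (l :: l2 :: L'') ++ ['.']) : List Char) =
          '.' :: (l ++ '.' :: (List.intercalate ['.'] (l2 :: L'') ++ ['.'])) := by
        rw [pvIcc]; simp
      constructor
      · intro h
        rw [hshape] at h
        rcases List.infix_cons_iff.mp h with hpre | hinf
        · rw [← hshape] at hpre
          have h2 := (List.cons_prefix_cons.mp hpre).2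
          exact ((pvK1t X _ hX (by simp) hXd hLd).mp h2).isInfix
        · have h2 := pvH2 _ _ l hld hinf
          have h3 := (ih (by simp) hL'd).mp h2
          exact h3.trans (List.suffix_cons l _).isInfix
      · intro h
        rcases List.infix_cons_iff.mp h with hpre | hinf
        · exact (List.cons_prefix_cons.mpr ⟨rfl, (pvK1t X _ hX (by simp) hXd hLd).mpr hpre⟩).isInfix
        · have h2 := (ih (by simp) hL'd).mpr hinf
          rw [hshape]
          have heq : ('.' :: (l ++ '.' :: (List.intercalate ['.'] (l2 :: L'') ++ ['.'])) : List Char) =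
              ('.' :: l) ++ ('.' :: (List.intercalate ['.'] (l2 :: L'') ++ ['.'])) := by simp
          rw [heq]
          exact h2.trans (List.suffix_append _ _).isInfix

lemma pvK3 (X : List (List Char)) (hX : X ≠ []) (hXd : ∀ p ∈ X, '.' ∉ p) :
    ∀ (L : List (List Char)), L ≠ [] → (∀ p ∈ L, '.' ∉ p) →
    (('.' :: (List.intercalate ['.'] X ++ ['.']) <:+: '.' :: List.intercalate ['.'] L) ↔ X <:+: L.dropLast) := by
  intro L
  induction L with
  | nil => intro hL; exact absurd rfl hL
  | cons l L' ih =>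
    intro _ hLd
    have hld : '.' ∉ l := hLd l List.mem_cons_self
    cases L' with
    | nil =>
      rw [pvIcs]
      constructor
      · intro h
        rcases List.infix_cons_iff.mp h with hpre | hinf
        · have h2 := (List.cons_prefix_cons.mp hpre).2
          exact absurd h2 (pvNoDotNotPrefix _ _ (by simp) hld)
        · exact absurd hinf (pvNoDotNotInfix _ _ (by simp) hld)
      · intro h
        rw [show ([l] : List (List Char)).dropLast = [] from rfl, List.infix_nil] at h
        exact absurd h hX
    | cons l2 L'' =>
      have hL'd : ∀ p ∈ l2 :: L'', '.' ∉ p := fun p hp => hLd p (List.mem_cons_of_mem _ hp)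
      have hshape : ('.' :: List.intercalate ['.'] (l :: l2 :: L'') : List Char) =
          '.' :: (l ++ '.' :: List.intercalate ['.'] (l2 :: L'')) := by
        rw [pvIcc]
      rw [List.dropLast_cons₂]
      constructor
      · intro h
        rw [hshape] at h
        rcases List.infix_cons_iff.mp h with hpre | hinf
        · rw [← hshape] at hpre
          have h2 := (List.cons_prefix_cons.mp hpre).2
          have h3 := (pvK1t' X (l :: l2 :: L'') hX (by simp) hXd hLd).mp h2
          rw [List.dropLast_cons₂] at h3
          exact h3.isInfix
        · have h2 := pvH2 _ _ l hld hinf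
          have h3 := (ih (by simp) hL'd).mp h2
          exact h3.trans (List.suffix_cons l _).isInfix
      · intro h
        rcases List.infix_cons_iff.mp h with hpre | hinf
        · have h2 := (pvK1t' X (l :: l2 :: L'') hX (by simp) hXd hLd).mpr (by
            rw [List.dropLast_cons₂]; exact hpre)
          exact (List.cons_prefix_cons.mpr ⟨rfl, h2⟩).isInfix
        · have h2 := (ih (by simp) hL'd).mpr hinf
          rw [hshape]
          have : ('.' :: (l ++ '.' :: List.intercalate ['.'] (l2 :: L'')) : List Char) =
              ('.' :: l) ++ ('.' :: List.intercalate ['.'] (l2 :: L'')) := by simp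
          rw [this]
          exact h2.trans (List.suffix_append _ _).isInfix

-- A's offset scan over component slices IS contiguous-sublist (infix) search
lemma pvSliceAny {α : Type} [DecidableEq α] (bp fp : List α) :
    ((PySem.List.pyRange 0 ((fp.length : Int) - (bp.length : Int) + 1) 1).any
      (fun off => PySem.List.slice fp (some off) (some (off + (bp.length : Int))) == bp)) =
    decide (bp <:+: fp) := by
  rw [Bool.eq_iff_iff, List.any_eq_true, decide_eq_true_eq]
  constructor
  · rintro ⟨i, hi, hsl⟩
    have hmem := PySem.List.mem_pyRange_one.mp hi
    obtain ⟨j, rfl⟩ : ∃ j : Nat, i = (j : Int) := ⟨i.toNat, (Int.toNat_of_nonneg hmem.1).symm⟩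
    rw [PySem.List.slice_natCast_add, beq_iff_eq] at hsl
    refine ⟨fp.take j, fp.drop (j + bp.length), ?_⟩
    conv_rhs => rw [← List.take_append_drop j fp]
    conv_rhs => rw [← List.take_append_drop bp.length (fp.drop j)]
    rw [hsl, List.drop_drop]
    simp [List.append_assoc]
  · rintro ⟨u, v, rfl⟩
    refine ⟨(u.length : Int), PySem.List.mem_pyRange_one.mpr ⟨by positivity, ?_⟩, ?_⟩
    · simp only [List.append_assoc, List.length_append]
      push_cast
      omega
    · rw [PySem.List.slice_natCast_add, beq_iff_eq]
      rw [List.append_assoc, List.drop_left, List.take_left]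

-- the relative-import scan: the bound keeps one component after the matched run,
-- so it is infix search in the path's components minus the last
lemma pvSliceAnyRel (parts fp : List String) (hp : 1 < parts.length) :
    ((PySem.List.pyRange 0 ((fp.length : Int) - (parts.length : Int) + 1) 1).any
      (fun i => PySem.List.slice fp (some i) (some (i + (parts.dropLast.length : Int))) == parts.dropLast)) =
    decide (parts.dropLast <:+: fp.dropLast) := by
  rcases fp with _ | ⟨f, fs⟩
  · rw [List.any_eq_false.mpr, eq_comm, decide_eq_false_iff_not]
    · intro h
      have := h.length_le
      simp [List.length_dropLast] at this
      omega
    · intro i hi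
      have := PySem.List.mem_pyRange_one.mp hi
      simp at this
      omega
  · rw [← pvSliceAny parts.dropLast (f :: fs).dropLast]
    have hb : ((f :: fs).length : Int) - (parts.length : Int) + 1 =
        (((f :: fs).dropLast.length : Int)) - ((parts.dropLast.length : Int)) + 1 := by
      simp only [List.length_cons, List.length_dropLast]
      push_cast [List.length_dropLast]
      omega
    rw [hb]
    apply PySem.List.any_congr_mem
    intro i hi
    have hmem := PySem.List.mem_pyRange_one.mp hi
    obtain ⟨j, rfl⟩ : ∃ j : Nat, i = (j : Int) := ⟨i.toNat, (Int.toNat_of_nonneg hmem.1).symm⟩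
    rw [PySem.List.slice_natCast_add, PySem.List.slice_natCast_add]
    have hjm : j + parts.dropLast.length ≤ fs.length := by
      simp only [List.length_dropLast, List.length_cons] at hmem ⊢
      omega
    have htd : List.drop j ((f :: fs).dropLast) =
        List.take ((f :: fs).length - 1 - j) (List.drop j (f :: fs)) := by
      rw [List.dropLast_eq_take, List.drop_take]
    rw [htd, List.take_take]
    have hmin : min (parts.dropLast.length) ((f :: fs).length - 1 - j) = parts.dropLast.length := by
      simp only [List.length_dropLast, List.length_cons] at hjm ⊢
      omega
    rw [hmin]

lemma pvTwoLe (cs : List Char) (h : '.' ∈ cs) : 2 ≤ (pvSplitC cs).length := by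
  obtain ⟨s, t, rfl⟩ := List.append_of_mem h
  rw [pvSplitC_append]
  have h1 := List.length_pos_iff.mpr (pvSplitC_ne_nil s)
  have h2 := List.length_pos_iff.mpr (pvSplitC_ne_nil t)
  simp only [List.length_append]
  omega

lemma pvMapToList (s : String) : (pvSplitDot s).map String.toList = pvSplitC s.toList := by
  rw [pvSplitDot_eq, List.map_map]
  have : String.toList ∘ String.ofList = id := by
    funext l; simp [String.toList_ofList]
  rw [this, List.map_id]

lemma pvSplitDotLen (s : String) : (pvSplitDot s).length = (pvSplitC s.toList).length := by
  rw [← pvMapToList, List.length_map]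

-- '.x.' is a substring of '.s.'  ⇔  x's components are a contiguous run of s's components
lemma pvIsInWrap (x s : String) :
    PySem.Str.isIn ("." ++ x ++ ".") ("." ++ s ++ ".") = decide (pvSplitDot x <:+: pvSplitDot s) := by
  rw [Bool.eq_iff_iff, PySem.Str.isIn_iff_infix, decide_eq_true_eq,
    ← pvInfixMapToList, pvMapToList, pvMapToList]
  have hx : ("." ++ x ++ ".").toList = '.' :: (List.intercalate ['.'] (pvSplitC x.toList) ++ ['.']) := by
    rw [pvJoin]; simp
  have hs : ("." ++ s ++ ".").toList = '.' :: (List.intercalate ['.'] (pvSplitC s.toList) ++ ['.']) := by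
    rw [pvJoin]; simp
  rw [hx, hs,
    pvK2 _ (pvSplitC_ne_nil _) (pvSplitC_no_dot _) _ (pvSplitC_ne_nil _) (pvSplitC_no_dot _)]

-- '.mods.' in '.s' (no trailing dot)  ⇔  mods is a run of s's components before the last one
lemma pvIsInWrapRel (mods : List String) (s : String) (hm : mods ≠ [])
    (hd : ∀ c ∈ mods.map String.toList, '.' ∉ c) :
    PySem.Str.isIn ("." ++ PySem.Str.join "." mods ++ ".") ("." ++ s) =
      decide (mods <:+: (pvSplitDot s).dropLast) := by
  rw [Bool.eq_iff_iff, PySem.Str.isIn_iff_infix, decide_eq_true_eq]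
  have hpat : ("." ++ PySem.Str.join "." mods ++ ".").toList =
      '.' :: (List.intercalate ['.'] (mods.map String.toList) ++ ['.']) := by
    simp only [String.toList_append, PySem.Str.toList_join]
    have : ("." : String).toList = ['.'] := rfl
    rw [this]
    rfl
  have htgt : ("." ++ s).toList = '.' :: List.intercalate ['.'] (pvSplitC s.toList) := by
    rw [pvJoin]; simp
  rw [hpat, htgt,
    pvK3 _ (by simpa using hm) hd _ (pvSplitC_ne_nil _) (pvSplitC_no_dot _),
    ← pvMapToList, ← List.map_dropLast, pvInfixMapToList]

-- ===== VERDICT (by name: the statement is the Claim_ definition above) =====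
set_option maxHeartbeats 1000000 in
theorem base_matches_parameterized_class_py_spec : Claim_equal_base_matches_parameterized_class_py := by
  intro bn ps _
  unfold Spec_base_matches_parameterized_class_py
  unfold base_matches_parameterized_class_py base_matches_parameterized_class_py_alt
  by_cases h1 : ps.contains bn = true
  · rw [if_pos h1, if_pos h1]
  · simp only [h1, Bool.false_eq_true, if_false]
    by_cases h2 : PySem.Str.isIn "." bn = false
    · rw [if_pos h2, if_pos h2]
    · rw [if_neg h2, if_neg h2]
      have hdot : '.' ∈ bn.toList := by
        rw [Bool.not_eq_false] at h2
        have := (PySem.Str.isIn_iff_infix _ _).mp h2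
        have h3 : ("." : String).toList = ['.'] := rfl
        rw [h3] at this
        exact (List.singleton_infix_iff _ _).mp this
      by_cases h3 : PySem.Str.startswith bn "." = true
      · -- relative-import branch
        rw [if_pos h3, if_pos h3]
        have hpe : ¬ (pvSplitDot (pvLstripDot bn)).isEmpty = true := by
          simp [pvSplitDot_ne_nil]
        rw [if_neg hpe]
        by_cases hlen : 1 < (pvSplitDot (pvLstripDot bn)).length
        · have hde : (pvSplitDot (pvLstripDot bn)).dropLast.isEmpty = false := by
            rw [List.isEmpty_eq_false_iff]
            intro hx
            have := @List.length_dropLast _ (pvSplitDot (pvLstripDot bn))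
            rw [hx] at this
            simp at this
            omega
          rw [if_neg (by rw [hde]; simp : ¬ (pvSplitDot (pvLstripDot bn)).dropLast.isEmpty = true)]
          apply PySem.List.any_congr_mem
          intro p _
          dsimp only
          rw [if_pos hlen, pvSliceAnyRel _ _ hlen,
            pvIsInWrapRel _ p (by rw [← List.length_pos_iff, List.length_dropLast]; omega)
              (by
                intro c hc
                rw [List.map_dropLast] at hc
                have hsub := (List.dropLast_sublist
                  ((pvSplitDot (pvLstripDot bn)).map String.toList)).subset hc
                rw [pvMapToList] at hsub
                exact pvSplitC_no_dot _ c hsub)]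
        · have hde : (pvSplitDot (pvLstripDot bn)).dropLast.isEmpty = true := by
            rw [List.isEmpty_iff]
            have := @List.length_dropLast _ (pvSplitDot (pvLstripDot bn))
            have hz : (pvSplitDot (pvLstripDot bn)).dropLast.length = 0 := by omega
            exact List.length_eq_zero_iff.mp hz
          rw [if_pos hde]
          apply PySem.List.any_congr_mem
          intro p _
          dsimp only
          rw [if_neg hlen]
          simp
      · -- partial-path branch
        rw [if_neg h3, if_neg h3]
        apply PySem.List.any_congr_mem
        intro p _
        dsimp only
        have h2le : 2 ≤ (pvSplitDot bn).length := by
          rw [pvSplitDotLen]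
          exact pvTwoLe _ hdot
        have hA : (if ((pvSplitDot p).getLastD "" == (pvSplitDot bn).getLastD "") = false then false
            else if (pvSplitDot bn).length ≤ (pvSplitDot p).length then
              pvSuffixLoop (pvSplitDot bn) (pvSplitDot p) ||
                (PySem.List.pyRange 0 (((pvSplitDot p).length : Int) - ((pvSplitDot bn).length : Int) + 1) 1).any
                  (fun off => PySem.List.slice (pvSplitDot p) (some off)
                    (some (off + ((pvSplitDot bn).length : Int))) == pvSplitDot bn)
            else false) =
            (((pvSplitDot p).getLastD "" == (pvSplitDot bn).getLastD "") &&
              decide (pvSplitDot bn <:+: pvSplitDot p)) := by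
          by_cases hk : ((pvSplitDot p).getLastD "" == (pvSplitDot bn).getLastD "") = false
          · rw [if_pos hk, hk, Bool.false_and]
          · rw [Bool.not_eq_false] at hk
            simp only [hk, Bool.true_eq_false, if_false, Bool.true_and]
            by_cases hle : (pvSplitDot bn).length ≤ (pvSplitDot p).length
            · rw [if_pos hle, pvSliceAny]
              by_cases hsl : pvSuffixLoop (pvSplitDot bn) (pvSplitDot p) = true
              · rw [hsl, Bool.true_or, eq_comm, decide_eq_true_eq]
                exact (pvSuffixLoop_suffix _ _ hle hsl).isInfix
              · rw [Bool.not_eq_true] at hsl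
                rw [hsl, Bool.false_or]
            · rw [if_neg hle, eq_comm, decide_eq_false_iff_not]
              intro h
              exact hle h.length_le
        rw [hA, pvEndsKey p _ (pvSplitDot_last_nodot bn), pvIsInWrap]
        by_cases hpl : 1 < (pvSplitDot p).length
        · simp [hpl]
        · have hfalse : decide (pvSplitDot bn <:+: pvSplitDot p) = false := by
            rw [decide_eq_false_iff_not]
            intro h
            have := h.length_le
            omega
          simp [hfalse, hpl]
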